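-- pv_equiv track=rewrite | github.com/bowen1993/BioDesigner | design/recommend.py | get_chain
-- ===== SOURCE A (Python) =====
-- def get_chain(elem, num, process):
--     """get chain which had predicted
--
--     according to information in process,
--     get the chain from first element to elem variable
--     and save the chain in a list
--
--     args:
--         elem: the last element in chain
--         num: the line number in process
--         process: a variable record the predict process
--     return:
--         a chain from first to elem variable
--     """
--     last_elem = process[num][elem][1]
--     if last_elem is None:
--         return [elem]
--     else:
--         chain = get_chain(last_elem, num-1, process)
--         chain.append(elem)
--         return chain
-- ===== SOURCE B (Python) =====
-- def get_chain(elem, num, process):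
--     """Iterative rewrite: walk the back-pointer chain with an explicit loop,
--     prepending each visited element so the result is built front-first
--     (no recursion, no final reverse)."""
--     result = []
--     cur, n = elem, num
--     while True:
--         result.insert(0, cur)
--         last = process[n][cur][1]
--         if last is None:
--             return result
--         cur, n = last, n - 1
-- ===== Notes on version B (the rewrite author's own statement) =====
-- stated objective: alternative
-- what changed: Replaces A's recursion (recurse on the back-pointer, then append elem to the returned chain) with an explicit iterative loop that walks the back-pointer chain and prepends each element, building the chain front-first with no recursion and no final reverse.
import Mathlib
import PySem

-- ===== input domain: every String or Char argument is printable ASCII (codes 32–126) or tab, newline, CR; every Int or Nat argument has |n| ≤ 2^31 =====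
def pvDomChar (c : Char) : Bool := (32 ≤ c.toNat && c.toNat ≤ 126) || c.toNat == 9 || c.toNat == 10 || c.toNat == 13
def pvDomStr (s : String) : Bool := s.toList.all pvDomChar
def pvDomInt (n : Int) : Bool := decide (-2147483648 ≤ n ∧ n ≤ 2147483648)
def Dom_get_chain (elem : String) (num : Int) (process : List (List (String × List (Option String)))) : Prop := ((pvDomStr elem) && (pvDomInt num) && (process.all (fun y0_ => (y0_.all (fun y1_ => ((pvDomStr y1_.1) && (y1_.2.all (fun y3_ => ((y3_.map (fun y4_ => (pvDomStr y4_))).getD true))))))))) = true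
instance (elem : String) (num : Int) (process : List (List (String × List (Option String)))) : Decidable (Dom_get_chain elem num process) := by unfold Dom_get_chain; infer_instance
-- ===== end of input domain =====

-- B replaces A's back-pointer recursion (recurse, then append elem) with an explicit
-- iterative loop that prepends each visited element, building the chain front-first
-- (objective: alternative decomposition; A mutates only the list it itself builds).

-- ===== PORT A =====
-- A: last_elem = process[num][elem][1]; if None return [elem]; else recurse on
-- (last_elem, num-1) and append elem.  none = a Python exception, propagated as Python
-- propagates it; get_chain returns [] exactly where the Python raises (outside Pre_).
def pvChainAux (elem : String) (num : Int) (process : List (List (String × List (Option String)))) : Option (List String) :=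
  match h : PySem.List.pyGet? process num with
  | none => none                                  -- IndexError
  | some d =>
    match (PySem.Dict.ofList d).get? elem with    -- process[num][elem]
    | none => none                                -- KeyError
    | some entry =>
      match PySem.List.pyGet? entry 1 with
      | none => none                              -- IndexError
      | some none => some [elem]                  -- return [elem]
      | some (some last_elem) =>
        match pvChainAux last_elem (num - 1) process with
        | none => none                            -- exception from the recursive call propagates
        | some chain => some (chain ++ [elem])    -- chain.append(elem); return chain
termination_by (num + process.length + 1).toNat
decreasing_by
  have hin : PySem.Raise.InRange process.length num := by
    by_contra hc
    rw [← PySem.List.pyGet?_eq_none_iff process num] at hc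
    simp [hc] at h
  obtain ⟨h1, _⟩ := hin
  omega

def get_chain (elem : String) (num : Int) (process : List (List (String × List (Option String)))) : List String :=
  (pvChainAux elem num process).getD []

-- ===== PORT B =====
-- the back pointer process[n][cur][1]; errors collapse to none here, which is fine:
-- on inputs where the Python raises (outside Pre_) B's port may return anything.
def pvBack (process : List (List (String × List (Option String)))) (n : Int) (cur : String) : Option String :=
  (((PySem.List.pyGet? process n).bind fun d => (PySem.Dict.ofList d).get? cur).bind
      fun entry => PySem.List.pyGet? entry 1).bind id

-- the while-loop of Source B: prepend cur, read the back pointer, return on None, else step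
-- to (last, n-1).  Fuel only makes the loop total; it never runs out under Pre_.
def pvAltLoop (process : List (List (String × List (Option String)))) : Nat → String → Int → List String → List String
  | 0, cur, _, acc => cur :: acc
  | fuel + 1, cur, n, acc =>
    match pvBack process n cur with
    | none => cur :: acc
    | some last => pvAltLoop process fuel last (n - 1) (cur :: acc)

def get_chain_alt (elem : String) (num : Int) (process : List (List (String × List (Option String)))) : List String :=
  pvAltLoop process (num + process.length + 1).toNat.succ elem num []

-- ===== PRECONDITION & SPEC =====
-- the back pointer as Python reads it: none = that read raises, some p = the pointer p
def pvPtr (process : List (List (String × List (Option String)))) (n : Int) (k : String) : Option (Option String) :=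
  ((PySem.List.pyGet? process n).bind fun d => (PySem.Dict.ofList d).get? k).bind
    fun entry => PySem.List.pyGet? entry 1

-- the element the walk holds after j steps (none once the walk has ended or failed)
def pvTrace (process : List (List (String × List (Option String)))) (n0 : Int) (k0 : String) : Nat → Option String
  | 0 => some k0
  | j + 1 => (pvTrace process n0 k0 j).bind fun k => (pvPtr process (n0 - j) k).bind id

-- Pre_ holds exactly when every table read the back-pointer walk from (elem, num) performs
-- succeeds — precisely the inputs on which the Python A returns (it raises elsewhere).
def Pre_get_chain (elem : String) (num : Int) (process : List (List (String × List (Option String)))) : Prop :=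
  PySem.Raise.InRange process.length num ∧
  ∀ j : Nat, j ≤ (num + (process.length : Int) + 1).toNat →
    ((pvTrace process num elem j).map fun k => (pvPtr process (num - j) k).isSome).getD true = true
instance (elem : String) (num : Int) (process : List (List (String × List (Option String)))) : Decidable (Pre_get_chain elem num process) := by unfold Pre_get_chain; infer_instance

def pvWitness_get_chain : String × Int × (List (List (String × List (Option String)))) :=
  ("b", 1, [[("a", [none, none])], [("b", [none, some "a"])]])

def Spec_get_chain (elem : String) (num : Int) (process : List (List (String × List (Option String)))) (out : List String) : Prop := out = get_chain_alt elem num process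
instance (elem : String) (num : Int) (process : List (List (String × List (Option String)))) (out : List String) : Decidable (Spec_get_chain elem num process out) := by unfold Spec_get_chain; infer_instance

-- ===== CLAIM (what is proved, stated in full; the proofs are below) =====
def Claim_equal_get_chain : Prop := ∀ (elem : String) (num : Int) (process : List (List (String × List (Option String)))), Dom_get_chain elem num process → Pre_get_chain elem num process → Spec_get_chain elem num process (get_chain elem num process)

-- ===== LEMMAS AND PROOFS =====

-- a dead trace stays dead
lemma pvTrace_none_mono (process : List (List (String × List (Option String)))) (n0 : Int) (k0 : String)
    (j : Nat) (hj : pvTrace process n0 k0 j = none) :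
    ∀ i, j ≤ i → pvTrace process n0 k0 i = none := by
  have hd : ∀ d, pvTrace process n0 k0 (j + d) = none := by
    intro d
    induction d with
    | zero => exact hj
    | succ d ihd => rw [show j + (d + 1) = (j + d) + 1 from rfl, pvTrace, ihd]; rfl
  intro i hij
  have : i = j + (i - j) := by omega
  rw [this]
  exact hd (i - j)

-- an unbounded trace hypothesis: A's recursion succeeds
lemma pvChainAux_isSome (process : List (List (String × List (Option String)))) :
    ∀ (fuel : Nat) (n : Int) (cur : String),
      (n + process.length + 1).toNat < fuel →
      (∀ j k, pvTrace process n cur j = some k → (pvPtr process (n - j) k).isSome) →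
      (pvChainAux cur n process).isSome := by
  intro fuel
  induction fuel with
  | zero => intro n cur h; omega
  | succ fuel ih =>
    intro n cur hf hyp
    have h0 := hyp 0 cur rfl
    simp only [Nat.cast_zero, sub_zero] at h0
    rw [pvChainAux]
    cases h1 : PySem.List.pyGet? process n with
    | none => simp [pvPtr, h1] at h0
    | some d =>
      cases h2 : (PySem.Dict.ofList d).get? cur with
      | none => simp [pvPtr, h1, h2] at h0
      | some entry =>
        cases h3 : PySem.List.pyGet? entry 1 with
        | none => simp [pvPtr, h1, h2, h3] at h0
        | some o =>
          cases o with
          | none => simp [h2, h3]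
          | some last =>
            simp only [h2, h3]
            have hin : PySem.Raise.InRange process.length n := by
              by_contra hc
              rw [← PySem.List.pyGet?_eq_none_iff process n] at hc
              simp [hc] at h1
            obtain ⟨hlo, _⟩ := hin
            have hshift : ∀ j, pvTrace process (n - 1) last j = pvTrace process n cur (j + 1) := by
              intro j
              induction j with
              | zero => simp [pvTrace, pvPtr, h1, h2, h3]
              | succ j ihj =>
                have he : n - ((j + 1 : Nat) : Int) = n - 1 - (j : Int) := by push_cast; ring
                rw [pvTrace, pvTrace, ihj, he]
            have hfu : (n - 1 + (process.length : Int) + 1).toNat < fuel := by omega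
            have hrec := ih (n - 1) last hfu (by
              intro j k hjk
              rw [hshift j] at hjk
              have hp := hyp (j + 1) k hjk
              have he : n - ((j : Int) + 1) = n - 1 - j := by ring
              rw [Nat.cast_add, Nat.cast_one, he] at hp
              exact hp)
            cases hc : pvChainAux last (n - 1) process with
            | none => simp [hc] at hrec
            | some ch => simp

-- the bounded Pre_ gives the unbounded trace hypothesis
lemma pre_unbounded (elem : String) (num : Int) (process : List (List (String × List (Option String))))
    (hpre : Pre_get_chain elem num process) :
    ∀ j k, pvTrace process num elem j = some k → (pvPtr process (num - j) k).isSome := by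
  obtain ⟨⟨hlo, hhi⟩, hpre⟩ := hpre
  intro j k hjk
  set B := (num + (process.length : Int) + 1).toNat with hB
  by_cases hle : j ≤ B
  · have := hpre j hle
    rw [hjk] at this
    simpa using this
  · -- beyond the bound the trace is already none: at step B the level is off the table
    exfalso
    have hBnone : pvTrace process num elem B = none := by
      cases hTB : pvTrace process num elem B with
      | none => rfl
      | some kB =>
        have hp := hpre B (le_refl _)
        rw [hTB] at hp
        simp only [Option.map_some, Option.getD_some] at hp
        have hoff : ¬ PySem.Raise.InRange process.length (num - B) := by
          intro hr
          obtain ⟨hlo, hhi⟩ := hr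
          omega
        rw [← PySem.List.pyGet?_eq_none_iff process (num - B)] at hoff
        simp [pvPtr, hoff] at hp
    have := pvTrace_none_mono process num elem B hBnone j (by omega)
    rw [hjk] at this
    simp at this

-- main invariant: with enough fuel the iterative loop from (cur, n) with accumulator acc
-- produces A's recursive chain for (cur, n) followed by acc, whenever A's recursion succeeds
lemma pvAltLoop_eq (process : List (List (String × List (Option String)))) :
    ∀ (fuel : Nat) (n : Int) (cur : String) (acc ch : List String),
      (n + process.length + 1).toNat < fuel →
      pvChainAux cur n process = some ch →
      pvAltLoop process fuel cur n acc = ch ++ acc := by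
  intro fuel
  induction fuel with
  | zero => intro n cur acc ch h; omega
  | succ fuel ih =>
    intro n cur acc ch hf hch
    rw [pvChainAux] at hch
    split at hch
    next h1 => simp at hch
    next d h1 =>
      have hin : PySem.Raise.InRange process.length n := by
        by_contra hc
        rw [← PySem.List.pyGet?_eq_none_iff process n] at hc
        simp [hc] at h1
      obtain ⟨hlo, _⟩ := hin
      split at hch
      next h2 => simp at hch
      next entry h2 =>
        split at hch
        next h3 => simp at hch
        next h3 =>
          -- back pointer is None: A returns [cur]; B prepends cur and stops
          have hc : ch = [cur] := by simpa using hch.symm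
          subst hc
          simp [pvAltLoop, pvBack, h1, h2, h3]
        next last h3 =>
          split at hch
          next hc => simp at hch
          next ch' hc =>
            have hch' : ch = ch' ++ [cur] := by simpa using hch.symm
            subst hch'
            rw [pvAltLoop]
            have hb : pvBack process n cur = some last := by
              simp [pvBack, h1, h2, h3]
            rw [hb]
            show pvAltLoop process fuel last (n - 1) (cur :: acc) = ch' ++ [cur] ++ acc
            rw [ih (n - 1) last (cur :: acc) ch' (by omega) hc]
            simp

-- ===== VERDICT (by name: the statement is the Claim_ definition above) =====
theorem get_chain_spec : Claim_equal_get_chain := by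
  intro elem num process _ hpre
  unfold Spec_get_chain get_chain get_chain_alt
  have hsome := pvChainAux_isSome process (num + process.length + 1).toNat.succ num elem
    (Nat.lt_succ_self _) (pre_unbounded elem num process hpre)
  cases hch : pvChainAux elem num process with
  | none => rw [hch] at hsome; simp at hsome
  | some ch =>
    rw [pvAltLoop_eq process _ num elem [] ch (Nat.lt_succ_self _) hch]
    simp
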